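-- pv_equiv track=rewrite | github.com/DianaYatsura/Python_Advanced | String Regular Expressions/double_string.py | double_string
-- ===== SOURCE A (Python) =====
-- def double_string(data):
--     counter = 0
--     for index, value in enumerate(data):
--         for next_i in data[index+1:]:
--             if value in next_i:
--                 counter += 1
--                 break
--     return counter
-- ===== SOURCE B (Python) =====
-- def double_string(data):
--     # Single right-to-left pass: maintain the set of ALL substrings of the
--     # elements seen so far (i.e. of every later element), so each element is
--     # tested with one set lookup instead of scanning all later strings.
--     subs = set()
--     counter = 0
--     for value in reversed(data):
--         if value in subs:
--             counter += 1
--         n = len(value)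
--         for i in range(n + 1):
--             for j in range(i, n + 1):
--                 subs.add(value[i:j])
--     return counter
-- ===== Notes on version B (the rewrite author's own statement) =====
-- stated objective: faster
-- what changed: Replaces A's per-element scan of all later strings with one right-to-left pass that maintains a hash set of every substring of the strings seen so far, so each element is decided by a single set lookup.
import Mathlib
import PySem

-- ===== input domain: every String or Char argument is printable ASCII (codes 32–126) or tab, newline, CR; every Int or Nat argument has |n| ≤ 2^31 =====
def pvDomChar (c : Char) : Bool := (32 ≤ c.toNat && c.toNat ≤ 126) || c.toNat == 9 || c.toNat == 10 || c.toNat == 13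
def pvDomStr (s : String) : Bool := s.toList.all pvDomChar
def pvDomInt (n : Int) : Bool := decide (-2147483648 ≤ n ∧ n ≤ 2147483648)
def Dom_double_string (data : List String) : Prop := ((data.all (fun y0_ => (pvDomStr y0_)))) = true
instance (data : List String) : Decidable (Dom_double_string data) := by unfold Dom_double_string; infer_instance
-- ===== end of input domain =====

-- B replaces A's quadratic scan over later elements by one right-to-left pass that
-- maintains the set of all substrings of the elements already seen (alternative algorithm).

-- ===== PORT A =====
-- the inner 'for next_i in data[index+1:]: if value in next_i: counter += 1; break' loop
def pvInnerA (value : String) : List String → Int → Int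
  | [], counter => counter
  | t :: ts, counter =>
    if PySem.Str.isIn value t then counter + 1 else pvInnerA value ts counter

def double_string (data : List String) : Int :=
  (PySem.List.enumerate data 0).foldl
    (fun counter p => pvInnerA p.2 (PySem.List.slice data (some (p.1 + 1)) none) counter) 0

-- ===== PORT B =====
-- 'for i in range(n+1): for j in range(i, n+1): subs.add(value[i:j])'
def pvAddSubs (subs : PySem.Set String) (v : String) : PySem.Set String :=
  (PySem.List.pyRange 0 ((v.length : Int) + 1) 1).foldl
    (fun s i =>
      (PySem.List.pyRange i ((v.length : Int) + 1) 1).foldl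
        (fun s j => PySem.Set.add s (PySem.Str.slice v (some i) (some j))) s)
    subs

def double_string_alt (data : List String) : Int :=
  (data.reverse.foldl
    (fun (st : Int × PySem.Set String) v =>
      (if PySem.Set.contains st.2 v then st.1 + 1 else st.1, pvAddSubs st.2 v))
    ((0 : Int), PySem.Set.empty)).1

-- ===== PRECONDITION & SPEC =====
def Spec_double_string (data : List String) (out : Int) : Prop := out = double_string_alt data
instance (data : List String) (out : Int) : Decidable (Spec_double_string data out) := by unfold Spec_double_string; infer_instance

-- ===== CLAIM (what is proved, stated in full; the proofs are below) =====
def Claim_equal_double_string : Prop := ∀ (data : List String), Dom_double_string data → Spec_double_string data (double_string data)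

-- ===== LEMMAS AND PROOFS =====

-- canonical count: elements that are a substring of some later element
def pvCountA : List String → Int
  | [] => 0
  | x :: xs => (if xs.any (fun t => PySem.Str.isIn x t) then 1 else 0) + pvCountA xs

-- B's loop viewed abstractly: acc = elements already processed (the later ones)
def pvCountR : List String → List String → Int
  | [], _ => 0
  | v :: l, acc => (if acc.any (fun t => PySem.Str.isIn v t) then 1 else 0) + pvCountR l (v :: acc)

theorem pvInnerA_eq (value : String) (rest : List String) (c : Int) :
    pvInnerA value rest c = c + (if rest.any (fun t => PySem.Str.isIn value t) then 1 else 0) := by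
  induction rest generalizing c with
  | nil => simp [pvInnerA]
  | cons t ts ih =>
    by_cases h : PySem.Chars.isIn value.toList t.toList = true
    · simp [pvInnerA, h]
    · simp [pvInnerA, h, ih]

theorem pvA_go (data : List String) : ∀ (xs : List String) (k : Nat) (c : Int),
    xs = data.drop k →
    (PySem.List.enumerate xs (k : Int)).foldl
      (fun counter p => pvInnerA p.2 (PySem.List.slice data (some (p.1 + 1)) none) counter) c
      = c + pvCountA xs := by
  intro xs
  induction xs with
  | nil => intro k c _; simp [PySem.List.enumerate_nil, pvCountA]
  | cons x xs' ih =>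
    intro k c hx
    have hx' : xs' = data.drop (k + 1) := by
      have : data.drop (k + 1) = (data.drop k).drop 1 := by
        rw [List.drop_drop]
      rw [this, ← hx]; rfl
    have hcast : (k : Int) + 1 = ((k + 1 : Nat) : Int) := by push_cast; ring
    rw [PySem.List.enumerate_cons]
    simp only [List.foldl_cons]
    rw [hcast, PySem.List.slice_from_natCast, ← hx', pvInnerA_eq]
    rw [ih (k + 1) _ hx']
    simp only [pvCountA]
    ring

theorem pvA_eq (data : List String) : double_string data = pvCountA data := by
  have := pvA_go data data 0 0 (by simp)
  simpa [double_string] using this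

-- membership in B's nested slice-adding fold
theorem pv_mem_fold (v x : String) (L : List Int) : ∀ (s : PySem.Set String),
    x ∈ L.foldl (fun s i =>
        (PySem.List.pyRange i ((v.length : Int) + 1) 1).foldl
          (fun s j => PySem.Set.add s (PySem.Str.slice v (some i) (some j))) s) s
    ↔ x ∈ s ∨ ∃ i ∈ L, ∃ j ∈ PySem.List.pyRange i ((v.length : Int) + 1) 1,
        x = PySem.Str.slice v (some i) (some j) := by
  induction L with
  | nil => intro s; simp
  | cons i L ihL =>
    intro s
    simp only [List.foldl_cons]
    rw [ihL, PySem.Set.mem_foldl_add]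
    constructor
    · rintro ((hs | ⟨j, hj, hxe⟩) | ⟨i', hi', j, hj, hxe⟩)
      · exact Or.inl hs
      · exact Or.inr ⟨i, List.mem_cons_self, j, hj, hxe⟩
      · exact Or.inr ⟨i', List.mem_cons_of_mem _ hi', j, hj, hxe⟩
    · rintro (hs | ⟨i', hi', j, hj, hxe⟩)
      · exact Or.inl (Or.inl hs)
      · rcases List.mem_cons.mp hi' with rfl | hrest
        · exact Or.inl (Or.inr ⟨j, hj, hxe⟩)
        · exact Or.inr ⟨i', hrest, j, hj, hxe⟩

-- the slices of v over 0 ≤ i ≤ j ≤ len v are exactly the infixes of v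
theorem pv_slice_iff_infix (v x : String) :
    (∃ i ∈ PySem.List.pyRange 0 ((v.length : Int) + 1) 1,
      ∃ j ∈ PySem.List.pyRange i ((v.length : Int) + 1) 1,
        x = PySem.Str.slice v (some i) (some j))
    ↔ x.toList <:+: v.toList := by
  have hl : v.toList.length = v.length := by simp
  constructor
  · rintro ⟨i, hi, j, hj, rfl⟩
    rw [PySem.List.mem_pyRange_one] at hi hj
    have h0i : 0 ≤ i := hi.1
    have h0j : 0 ≤ j := le_trans h0i hj.1
    rw [PySem.Str.toList_slice, PySem.Chars.slice_eq_listSlice,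
      PySem.List.slice_toNat _ h0i h0j]
    exact (List.take_prefix _ _).isInfix.trans (List.drop_suffix _ _).isInfix
  · rintro ⟨s₁, s₂, hsplit⟩
    have hlen : s₁.length + x.toList.length ≤ v.toList.length := by
      have h1 := congrArg List.length hsplit
      simp only [List.length_append] at h1
      omega
    refine ⟨(s₁.length : Int), ?_, ((s₁.length + x.toList.length : Nat) : Int), ?_, ?_⟩
    · rw [PySem.List.mem_pyRange_one]
      omega
    · rw [PySem.List.mem_pyRange_one]
      omega
    · have h1 : (PySem.Str.slice v (some (s₁.length : Int))
          (some ((s₁.length + x.toList.length : Nat) : Int))).toList = x.toList := by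
        rw [PySem.Str.toList_slice, PySem.Chars.slice_eq_listSlice,
          PySem.List.slice_natCast]
        rw [← hsplit, List.append_assoc, List.drop_left]
        simp
      have h2 := congrArg String.ofList h1
      simpa using h2.symm

theorem pv_mem_addSubs (subs : PySem.Set String) (v x : String) :
    x ∈ pvAddSubs subs v ↔ x ∈ subs ∨ x.toList <:+: v.toList := by
  unfold pvAddSubs
  rw [pv_mem_fold, pv_slice_iff_infix]

-- B's loop computes pvCountR, given that subs holds exactly the substrings of acc
theorem pvB_loop (l : List String) : ∀ (acc : List String) (c : Int) (subs : PySem.Set String),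
    (∀ x, x ∈ subs ↔ ∃ t ∈ acc, x.toList <:+: t.toList) →
    (l.foldl (fun (st : Int × PySem.Set String) v =>
        (if PySem.Set.contains st.2 v then st.1 + 1 else st.1, pvAddSubs st.2 v))
      (c, subs)).1 = c + pvCountR l acc := by
  induction l with
  | nil => intro acc c subs _; simp [pvCountR]
  | cons v l ih =>
    intro acc c subs hsubs
    have hcond : PySem.Set.contains subs v = acc.any (fun t => PySem.Str.isIn v t) := by
      by_cases h : ∃ t ∈ acc, v.toList <:+: t.toList
      · have h1 : PySem.Set.contains subs v = true := by
          rw [PySem.Set.contains_iff, hsubs]; exact h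
        have h2 : acc.any (fun t => PySem.Str.isIn v t) = true := by
          rw [List.any_eq_true]
          rcases h with ⟨t, ht, hinf⟩
          exact ⟨t, ht, (PySem.Str.isIn_iff_infix _ _).mpr hinf⟩
        rw [h1, h2]
      · have h1 : PySem.Set.contains subs v = false := by
          rw [Bool.eq_false_iff, Ne, PySem.Set.contains_iff, hsubs]; exact h
        have h2 : acc.any (fun t => PySem.Str.isIn v t) = false := by
          rw [Bool.eq_false_iff, Ne, List.any_eq_true]
          intro ⟨t, ht, hin⟩
          exact h ⟨t, ht, (PySem.Str.isIn_iff_infix _ _).mp hin⟩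
        rw [h1, h2]
    simp only [List.foldl_cons]
    rw [ih (v :: acc) _ (pvAddSubs subs v) ?_]
    · simp only [pvCountR, hcond]
      split_ifs <;> ring
    · intro x
      rw [pv_mem_addSubs, hsubs]
      constructor
      · rintro (⟨t, ht, hinf⟩ | hinf)
        · exact ⟨t, List.mem_cons_of_mem _ ht, hinf⟩
        · exact ⟨v, List.mem_cons_self, hinf⟩
      · rintro ⟨t, ht, hinf⟩
        rcases List.mem_cons.mp ht with rfl | hrest
        · exact Or.inr hinf
        · exact Or.inl ⟨t, hrest, hinf⟩

theorem pvB_eq (data : List String) : double_string_alt data = pvCountR data.reverse [] := by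
  unfold double_string_alt
  have := pvB_loop data.reverse [] 0 PySem.Set.empty (by simp [PySem.Set.empty])
  simpa using this

theorem pvCountR_append (l₁ l₂ : List String) : ∀ acc,
    pvCountR (l₁ ++ l₂) acc = pvCountR l₁ acc + pvCountR l₂ (l₁.reverse ++ acc) := by
  induction l₁ with
  | nil => intro acc; simp [pvCountR]
  | cons v l₁ ih =>
    intro acc
    simp only [List.cons_append, pvCountR, ih (v :: acc), List.reverse_cons,
      List.append_assoc, List.nil_append]
    ring

theorem pvCountR_reverse (data : List String) : pvCountR data.reverse [] = pvCountA data := by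
  induction data with
  | nil => simp [pvCountR, pvCountA]
  | cons x xs ih =>
    rw [List.reverse_cons, pvCountR_append, ih]
    simp only [pvCountR, pvCountA, List.reverse_reverse, List.append_nil]
    ring

-- ===== VERDICT (by name: the statement is the Claim_ definition above) =====
theorem double_string_spec : Claim_equal_double_string := by
  intro data _
  unfold Spec_double_string
  rw [pvA_eq, pvB_eq, pvCountR_reverse]
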